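-- pv_equiv track=rewrite | github.com/shanggao2/coopTA-MADRL | MADRL/env_m/env_misc.py | is_cover_part
-- ===== SOURCE A (Python) =====
-- def is_cover_part(t_skills, w_skills):
--     assert len(t_skills) == len(w_skills)
--     is_need_skill = False
--     for i in range(0, len(t_skills)):
--         if t_skills[i] == '1':
--             is_need_skill = True
--             if w_skills[i] == '1':
--                 return True
--     if is_need_skill is False:
--         return True
--     return False
-- ===== SOURCE B (Python) =====
-- def is_cover_part(t_skills, w_skills):
--     assert len(t_skills) == len(w_skills)
--     needed = {i for i, s in enumerate(t_skills) if s == '1'}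
--     covered = {i for i, s in enumerate(w_skills) if s == '1'}
--     return not needed or not needed.isdisjoint(covered)
-- ===== Notes on version B (the rewrite author's own statement) =====
-- stated objective: alternative
-- what changed: A's fused positional loop carrying an is_need_skill flag with early return is replaced by building the index set of needed skills and the index set of the worker's skills via set comprehensions and answering with an emptiness test and a set-disjointness test.
import Mathlib
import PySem

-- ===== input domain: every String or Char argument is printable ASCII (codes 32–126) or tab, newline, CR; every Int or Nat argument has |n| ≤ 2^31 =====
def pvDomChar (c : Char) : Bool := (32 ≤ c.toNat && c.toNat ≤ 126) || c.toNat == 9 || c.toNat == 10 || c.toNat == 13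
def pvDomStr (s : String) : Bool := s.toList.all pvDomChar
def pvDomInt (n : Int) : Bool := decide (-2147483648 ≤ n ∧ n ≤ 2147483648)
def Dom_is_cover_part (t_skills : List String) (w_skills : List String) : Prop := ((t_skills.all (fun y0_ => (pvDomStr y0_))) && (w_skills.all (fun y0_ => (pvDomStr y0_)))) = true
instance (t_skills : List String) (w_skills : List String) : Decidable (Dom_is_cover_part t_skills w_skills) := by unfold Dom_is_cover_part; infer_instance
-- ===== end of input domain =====

-- B replaces A's fused flag-carrying positional loop by building the index set of needed skills and the index set of owned skills and testing emptiness / set disjointness (alternative decomposition, same cost).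


-- ===== PORT A =====
-- for i in range(0, len(t_skills)): index recursion carrying the is_need_skill flag.
-- getD is exact here: i < length is guarded, and Pre_ gives equal lengths for w.
def isCoverLoopA (t w : List String) (i : Nat) (need : Bool) : Bool :=
  if _h : i < t.length then
    if t.getD i "" = "1" then
      if w.getD i "" = "1" then true
      else isCoverLoopA t w (i + 1) true
    else isCoverLoopA t w (i + 1) need
  else !need  -- 'if is_need_skill is False: return True; return False'
termination_by t.length - i

def is_cover_part (t_skills : List String) (w_skills : List String) : Bool :=
  isCoverLoopA t_skills w_skills 0 false

-- ===== PORT B =====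
-- needed = {i for i, s in enumerate(t_skills) if s == '1'}; covered likewise;
-- return not needed or not needed.isdisjoint(covered)
def is_cover_part_alt (t_skills : List String) (w_skills : List String) : Bool :=
  let needed : PySem.Set Int :=
    PySem.Set.ofList (((PySem.List.enumerate t_skills 0).filter (fun p => p.2 = "1")).map (fun p => p.1))
  let covered : PySem.Set Int :=
    PySem.Set.ofList (((PySem.List.enumerate w_skills 0).filter (fun p => p.2 = "1")).map (fun p => p.1))
  needed.isEmpty || !(PySem.Set.isdisjoint needed covered)

-- ===== PRECONDITION & SPEC =====
-- Pre_ excludes unequal-length inputs, on which A's assert raises AssertionError (B keeps the same assert).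
def Pre_is_cover_part (t_skills : List String) (w_skills : List String) : Prop :=
  t_skills.length = w_skills.length
instance (t_skills : List String) (w_skills : List String) : Decidable (Pre_is_cover_part t_skills w_skills) := by unfold Pre_is_cover_part; infer_instance
def pvWitness_is_cover_part : List String × List String := (["1", "0"], ["0", "1"])

def Spec_is_cover_part (t_skills : List String) (w_skills : List String) (out : Bool) : Prop := out = is_cover_part_alt t_skills w_skills
instance (t_skills : List String) (w_skills : List String) (out : Bool) : Decidable (Spec_is_cover_part t_skills w_skills out) := by unfold Spec_is_cover_part; infer_instance

-- ===== CLAIM (what is proved, stated in full; the proofs are below) =====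
def Claim_equal_is_cover_part : Prop := ∀ (t_skills : List String) (w_skills : List String), Dom_is_cover_part t_skills w_skills → Pre_is_cover_part t_skills w_skills → Spec_is_cover_part t_skills w_skills (is_cover_part t_skills w_skills)

-- ===== LEMMAS AND PROOFS =====

-- A's loop rewritten as structural recursion over the (synchronised) suffixes.
def coverAux : List String → List String → Bool → Bool
  | [], _, need => !need
  | _ :: _, [], need => !need
  | a :: t, b :: w, need =>
      if a = "1" then (if b = "1" then true else coverAux t w true)
      else coverAux t w need

lemma loopA_eq_aux (t w : List String) (h : t.length = w.length) :
    ∀ n i need, t.length - i = n →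
      isCoverLoopA t w i need = coverAux (t.drop i) (w.drop i) need := by
  intro n
  induction n with
  | zero =>
      intro i need hn
      have hi : ¬ i < t.length := by omega
      rw [isCoverLoopA, dif_neg hi]
      rw [List.drop_eq_nil_of_le (by omega)]
      simp [coverAux]
  | succ m ih =>
      intro i need hn
      have hi : i < t.length := by omega
      have hiw : i < w.length := by omega
      have hdt : t.drop i = t[i] :: t.drop (i + 1) := (List.drop_eq_getElem_cons hi)
      have hdw : w.drop i = w[i] :: w.drop (i + 1) := (List.drop_eq_getElem_cons hiw)
      have hgt : t.getD i "" = t[i] := List.getD_eq_getElem t "" hi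
      have hgw : w.getD i "" = w[i] := List.getD_eq_getElem w "" hiw
      rw [isCoverLoopA, dif_pos hi, hdt, hdw, hgt, hgw]
      by_cases h1 : t[i] = "1"
      · by_cases h2 : w[i] = "1"
        · simp [coverAux, h1, h2]
        · simp only [coverAux, if_pos h1, if_neg h2]
          exact ih (i + 1) true (by omega)
      · simp only [coverAux, if_neg h1]
        exact ih (i + 1) need (by omega)

-- the two semantic propositions both programs decide
def NeedP (t : List String) : Prop := ∃ k, ∃ _ : k < t.length, t[k] = "1"
def CovP (t w : List String) : Prop :=
  ∃ k, ∃ _ : k < t.length, ∃ _ : k < w.length, t[k] = "1" ∧ w[k] = "1"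

lemma needP_cons (a : String) (t : List String) :
    NeedP (a :: t) ↔ a = "1" ∨ NeedP t := by
  constructor
  · rintro ⟨k, hk, h⟩
    cases k with
    | zero => exact Or.inl h
    | succ k => exact Or.inr ⟨k, by simpa using hk, by simpa using h⟩
  · rintro (h | ⟨k, hk, h⟩)
    · exact ⟨0, by simp, h⟩
    · exact ⟨k + 1, by simpa using hk, by simpa using h⟩

lemma covP_cons (a b : String) (t w : List String) :
    CovP (a :: t) (b :: w) ↔ (a = "1" ∧ b = "1") ∨ CovP t w := by
  constructor
  · rintro ⟨k, hk, hk', h⟩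
    cases k with
    | zero => exact Or.inl h
    | succ k =>
        exact Or.inr ⟨k, by simpa using hk, by simpa using hk', by simpa using h⟩
  · rintro (h | ⟨k, hk, hk', h⟩)
    · exact ⟨0, by simp, by simp, h⟩
    · exact ⟨k + 1, by simpa using hk, by simpa using hk', by simpa using h⟩

lemma coverAux_iff (t : List String) : ∀ (w : List String) (need : Bool),
    t.length = w.length →
    (coverAux t w need = true ↔ (CovP t w ∨ (need = false ∧ ¬ NeedP t))) := by
  induction t with
  | nil =>
      intro w need h
      have : w = [] := by simpa using h.symm
      subst this
      cases need <;> simp [coverAux, NeedP, CovP]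
  | cons a t ih =>
      intro w need h
      cases w with
      | nil => simp at h
      | cons b w =>
          have h' : t.length = w.length := by simpa using h
          by_cases h1 : a = "1"
          · by_cases h2 : b = "1"
            · simp [coverAux, h1, h2, covP_cons]
            · simp only [coverAux, if_pos h1, if_neg h2, ih w true h', covP_cons,
                needP_cons]
              constructor
              · rintro (hc | ⟨hf, _⟩)
                · exact Or.inl (Or.inr hc)
                · exact absurd hf (by simp)
              · rintro ((⟨_, hb⟩ | hc) | ⟨_, hne⟩)
                · exact absurd hb h2
                · exact Or.inl hc
                · exact absurd (Or.inl h1) hne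
          · simp only [coverAux, if_neg h1, ih w need h', covP_cons, needP_cons]
            constructor
            · rintro (hc | ⟨hn, hne⟩)
              · exact Or.inl (Or.inr hc)
              · exact Or.inr ⟨hn, by tauto⟩
            · rintro ((⟨ha, _⟩ | hc) | ⟨hn, hne⟩)
              · exact absurd ha h1
              · exact Or.inl hc
              · exact Or.inr ⟨hn, by tauto⟩

lemma mem_idxList (s : List String) (j : Int) :
    (j ∈ ((PySem.List.enumerate s 0).filter (fun p => p.2 = "1")).map (fun p => p.1)) ↔
      ∃ k, ∃ _ : k < s.length, s[k] = "1" ∧ j = (k : Int) := by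
  simp only [List.mem_map, List.mem_filter, PySem.List.mem_enumerate_iff]
  constructor
  · rintro ⟨p, ⟨⟨k, hk, rfl⟩, hp2⟩, rfl⟩
    exact ⟨k, hk, by simpa using hp2, by simp⟩
  · rintro ⟨k, hk, hs, rfl⟩
    exact ⟨((k : Int), s[k]), ⟨⟨k, hk, by simp⟩, by simpa using hs⟩, rfl⟩

lemma isdisjoint_false {s t : List Int} (h : PySem.Set.isdisjoint s t = false) :
    ∃ j, j ∈ s ∧ j ∈ t := by
  by_contra hc
  push Not at hc
  have : PySem.Set.isdisjoint s t = true :=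
    (PySem.Set.isdisjoint_iff s t).2 (fun x hx => hc x hx)
  simp [h] at this

lemma alt_iff (t w : List String) :
    (is_cover_part_alt t w = true ↔ (¬ NeedP t ∨ CovP t w)) := by
  unfold is_cover_part_alt
  simp only [Bool.or_eq_true, List.isEmpty_iff, Bool.not_eq_true',
    ← Bool.not_eq_true (PySem.Set.isdisjoint _ _)]
  rw [List.eq_nil_iff_forall_not_mem]
  constructor
  · rintro (hemp | hdis)
    · left
      rintro ⟨k, hk, hs⟩
      exact hemp (k : Int) ((PySem.Set.mem_ofList _ _).2 ((mem_idxList t _).2 ⟨k, hk, hs, rfl⟩))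
    · right
      rw [Bool.not_eq_true] at hdis
      obtain ⟨j, hj1, hj2⟩ := isdisjoint_false hdis
      rw [PySem.Set.mem_ofList, mem_idxList] at hj1
      rw [PySem.Set.mem_ofList, mem_idxList] at hj2
      obtain ⟨k, hk, hsk, rfl⟩ := hj1
      obtain ⟨k', hk', hsk', hkk'⟩ := hj2
      have : k = k' := by exact_mod_cast hkk'
      subst this
      exact ⟨k, hk, hk', hsk, hsk'⟩
  · rintro (hneed | ⟨k, hk, hk', hs, hs'⟩)
    · left
      intro j hj
      rw [PySem.Set.mem_ofList, mem_idxList] at hj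
      obtain ⟨k, hkl, hsk, rfl⟩ := hj
      exact hneed ⟨k, hkl, hsk⟩
    · right
      intro hdis
      have := (PySem.Set.isdisjoint_iff _ _).1 hdis (k : Int)
        ((PySem.Set.mem_ofList _ _).2 ((mem_idxList t _).2 ⟨k, hk, hs, rfl⟩))
      exact this ((PySem.Set.mem_ofList _ _).2 ((mem_idxList w _).2 ⟨k, hk', hs', rfl⟩))

-- ===== VERDICT (by name: the statement is the Claim_ definition above) =====
theorem is_cover_part_spec : Claim_equal_is_cover_part := by
  intro t w _ hpre
  unfold Spec_is_cover_part is_cover_part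
  rw [loopA_eq_aux t w hpre t.length 0 false (by omega)]
  simp only [List.drop_zero]
  rw [Bool.eq_iff_iff, coverAux_iff t w false hpre, alt_iff t w]
  tauto
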